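-- pv_equiv track=rewrite | github.com/SkySaksham/PyDBQL | legacy_code/table.py | table_header
-- ===== SOURCE A (Python) =====
-- def table_header (raw_string) :
--     header = ""
--     column_width = ""
--
--     is_column_width = False
--
--     for i in raw_string.split(":") :
--         if is_column_width:
--             column_width+= i+":"
--             is_column_width=False
--         else :
--             header += i+":"
--             is_column_width = True
--
--     return header[0:len(header)-1],column_width[0:len(column_width)-1]
-- ===== SOURCE B (Python) =====
-- def table_header(raw_string):
--     tokens = raw_string.split(":")
--     return ":".join(tokens[0::2]), ":".join(tokens[1::2])
-- ===== Notes on version B (the rewrite author's own statement) =====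
-- stated objective: idiomatic
-- what changed: Replaces the alternating boolean flag with append-then-trim-last-character by one split, two stride slices (even-indexed and odd-indexed tokens) and a join of each group with the separator.
import Mathlib
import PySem

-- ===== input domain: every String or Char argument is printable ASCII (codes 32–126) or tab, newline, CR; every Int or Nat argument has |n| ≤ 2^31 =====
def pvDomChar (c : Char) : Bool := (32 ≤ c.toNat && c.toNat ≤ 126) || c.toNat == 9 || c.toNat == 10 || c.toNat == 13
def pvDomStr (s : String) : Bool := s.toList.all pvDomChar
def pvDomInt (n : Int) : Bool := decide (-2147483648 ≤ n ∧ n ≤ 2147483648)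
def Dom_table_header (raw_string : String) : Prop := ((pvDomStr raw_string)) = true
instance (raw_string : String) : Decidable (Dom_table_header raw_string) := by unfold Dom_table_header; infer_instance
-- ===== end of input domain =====

-- B replaces A's alternating-flag loop with trailing-colon trim by two stride slices plus join (idiomatic).


-- ===== PORT A =====
-- (exact on code points: the Python str operations are ported through PySem.Chars over raw_string.toList)
def table_header (raw_string : String) : String × String :=
  let st := (PySem.Chars.splitOn raw_string.toList [':']).foldl
    (fun (s : List Char × List Char × Bool) i =>
      if s.2.2 then (s.1, s.2.1 ++ (i ++ [':']), false)
      else (s.1 ++ (i ++ [':']), s.2.1, true))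
    ([], [], false)
  (String.ofList (PySem.Chars.slice st.1 (some 0) (some ((st.1.length : Int) - 1))),
   String.ofList (PySem.Chars.slice st.2.1 (some 0) (some ((st.2.1.length : Int) - 1))))

-- ===== PORT B =====
def table_header_alt (raw_string : String) : String × String :=
  let tokens := PySem.Chars.splitOn raw_string.toList [':']
  (String.ofList (PySem.Chars.join [':'] ((PySem.List.slice? tokens (some 0) none 2).getD [])),
   String.ofList (PySem.Chars.join [':'] ((PySem.List.slice? tokens (some 1) none 2).getD [])))

-- ===== PRECONDITION & SPEC =====
def Spec_table_header (raw_string : String) (out : String × String) : Prop := out = table_header_alt raw_string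
instance (raw_string : String) (out : String × String) : Decidable (Spec_table_header raw_string out) := by unfold Spec_table_header; infer_instance

-- ===== CLAIM (what is proved, stated in full; the proofs are below) =====
def Claim_equal_table_header : Prop := ∀ (raw_string : String), Dom_table_header raw_string → Spec_table_header raw_string (table_header raw_string)

-- ===== LEMMAS AND PROOFS =====

-- even/odd-indexed subsequences
mutual
def pvEvens {α : Type} : List α → List α
  | [] => []
  | x :: xs => x :: pvOdds xs
def pvOdds {α : Type} : List α → List α
  | [] => []
  | _ :: xs => pvEvens xs
end

-- two-at-a-time induction scheme
def pvTwo {α : Type} : List α → Unit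
  | [] => ()
  | [_] => ()
  | _ :: _ :: xs => pvTwo xs

def pvWithC (xs : List (List Char)) : List Char := (xs.map (· ++ [':'])).flatten

lemma pvFMrange {α : Type} (xs : List α) :
    (List.range ((xs.length + 1) / 2)).filterMap (fun k => xs[2 * k]?) = pvEvens xs := by
  induction xs using pvTwo.induct with
  | case1 => simp [pvEvens]
  | case2 x => simp [pvEvens, pvOdds, List.range_succ, List.filterMap]
  | case3 x y rest ih =>
      have hlen : (((x :: y :: rest).length + 1) / 2) = ((rest.length + 1) / 2) + 1 := by
        simp; omega
      rw [hlen, List.range_succ_eq_map]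
      simp only [List.filterMap_cons, List.filterMap_map]
      have hsh : ∀ k, (x :: y :: rest)[2 * Nat.succ k]? = rest[2 * k]? := by
        intro k
        have h2 : 2 * Nat.succ k = 2 * k + 2 := by omega
        simp [h2]
      simp only [Function.comp_def, hsh]
      simp [pvEvens, pvOdds, ih]

lemma pvSlice2_zero {α : Type} (xs : List α) :
    PySem.List.slice? xs (some 0) none 2 = some (pvEvens xs) := by
  rw [← pvFMrange]
  unfold PySem.List.slice? PySem.List.sliceIndices
  norm_num
  have hc : (if 0 < xs.length then (((xs.length : Int) + 2 - 1) / 2).toNat else 0)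
      = (xs.length + 1) / 2 := by
    by_cases h : 0 < xs.length <;> simp [h] <;> omega
  rw [hc]
  congr 1

lemma pvOdds_eq_evens_tail {α : Type} (x : α) (rest : List α) :
    pvOdds (x :: rest) = pvEvens rest := rfl

lemma pvSlice2_one {α : Type} (xs : List α) :
    PySem.List.slice? xs (some 1) none 2 = some (pvOdds xs) := by
  cases xs with
  | nil => rfl
  | cons x rest =>
      rw [pvOdds_eq_evens_tail, ← pvFMrange]
      unfold PySem.List.slice? PySem.List.sliceIndices
      norm_num
      have hc : (if 0 < rest.length then (((rest.length : Int) + 2 - 1) / 2).toNat else 0)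
          = (rest.length + 1) / 2 := by
        by_cases h : 0 < rest.length <;> simp [h] <;> omega
      rw [hc]
      congr 1
      funext k
      have h2 : ((1 : Int) + 2 * (k : Int)).toNat = 2 * k + 1 := by omega
      rw [h2]
      simp

-- the loop of A, characterised
lemma pvLoopA (toks : List (List Char)) : ∀ h c : List Char,
    toks.foldl
      (fun (s : List Char × List Char × Bool) i =>
        if s.2.2 then (s.1, s.2.1 ++ (i ++ [':']), false)
        else (s.1 ++ (i ++ [':']), s.2.1, true))
      (h, c, false)
    = (h ++ pvWithC (pvEvens toks), c ++ pvWithC (pvOdds toks), toks.length % 2 == 1) := by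
  induction toks using pvTwo.induct with
  | case1 => intro h c; simp [pvEvens, pvOdds, pvWithC]
  | case2 x => intro h c; simp [pvEvens, pvOdds, pvWithC]
  | case3 x y rest ih =>
      intro h c
      simp only [List.foldl_cons]
      norm_num
      rw [ih]
      simp [pvEvens, pvOdds, pvWithC]
      omega

lemma pvWithC_ne_nil (q : List Char) (rest : List (List Char)) : pvWithC (q :: rest) ≠ [] := by
  simp [pvWithC]

lemma pvDropLast_withC (xs : List (List Char)) :
    (pvWithC xs).dropLast = PySem.Chars.join [':'] xs := by
  induction xs with
  | nil => simp [pvWithC, PySem.Chars.join, List.intercalate]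
  | cons p rest ih =>
      cases rest with
      | nil => simp [pvWithC, PySem.Chars.join_singleton]
      | cons q rest' =>
          have h1 : pvWithC (p :: q :: rest') = (p ++ [':']) ++ pvWithC (q :: rest') := by
            simp [pvWithC]
          rw [h1, List.dropLast_append_of_ne_nil (pvWithC_ne_nil q rest'),
              PySem.Chars.join_cons_cons, ih]

lemma pvSliceDropLast (xs : List Char) :
    PySem.Chars.slice xs (some 0) (some ((xs.length : Int) - 1)) = xs.dropLast := by
  cases xs with
  | nil => rfl
  | cons x rest =>
      have h : ((x :: rest).length : Int) - 1 = (rest.length : Nat) := by simp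
      rw [PySem.Chars.slice_eq_listSlice, h]
      simp [PySem.List.slice_zero_start, PySem.List.slice_to_natCast, List.dropLast_eq_take]

-- ===== VERDICT (by name: the statement is the Claim_ definition above) =====
theorem table_header_spec : Claim_equal_table_header := by
  intro raw_string _
  unfold Spec_table_header
  simp only [table_header, table_header_alt, pvLoopA, pvSlice2_zero, pvSlice2_one,
    Option.getD_some, List.nil_append, pvSliceDropLast, pvDropLast_withC]
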